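-- pv_equiv track=rewrite | github.com/jimmy605/My_LeetCode_Code | 2432_longest_task.py | hardestWorker
-- ===== SOURCE A (Python) =====
-- def hardestWorker(n, logs):
--     leave_time = 0
--     log_data = []
--     highest_time = 0
--
--     for log in logs:
--         time = abs(leave_time - log[1])
--
--         if time > highest_time:
--             highest_time = time
--             log_data = [log[0]]
--         elif time == highest_time:
--             log_data.append(log[0])
--
--         leave_time = log[1]
--
--     return sorted(log_data)[0]
-- ===== SOURCE B (Python) =====
-- def hardestWorker(n, logs):
--     pairs = []
--     prev = 0
--     for log in logs:
--         pairs.append((abs(prev - log[1]), log[0]))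
--         prev = log[1]
--     pairs.sort(key=lambda p: (-p[0], p[1]))
--     return pairs[0][1]
-- ===== Notes on version B (the rewrite author's own statement) =====
-- stated objective: alternative
-- what changed: A tracks a running maximum duration while collecting a candidate id list and finally sorts just the candidates; B builds the full (duration, id) table in one pass, sorts the whole table by (-duration, id) and returns the id of the first row.
import Mathlib
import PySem

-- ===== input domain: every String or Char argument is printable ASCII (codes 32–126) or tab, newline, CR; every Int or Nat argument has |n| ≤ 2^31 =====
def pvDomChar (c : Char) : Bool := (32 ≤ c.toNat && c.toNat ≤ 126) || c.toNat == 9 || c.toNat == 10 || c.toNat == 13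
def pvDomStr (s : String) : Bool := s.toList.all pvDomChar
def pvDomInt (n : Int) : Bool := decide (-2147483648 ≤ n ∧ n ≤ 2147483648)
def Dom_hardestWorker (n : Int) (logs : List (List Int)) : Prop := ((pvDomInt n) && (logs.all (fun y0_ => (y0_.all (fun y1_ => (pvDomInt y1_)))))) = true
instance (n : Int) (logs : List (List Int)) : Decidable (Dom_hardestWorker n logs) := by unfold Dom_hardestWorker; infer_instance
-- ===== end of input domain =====

-- B changes the strategy: instead of A's running-max + candidate-list + sort-of-candidates,
-- B tabulates every (duration, id) pair, sorts the whole table by (-duration, id) and takes the first id.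

-- ===== PORT A =====
-- loop body of A's `for log in logs`, state = (leave_time, log_data, highest_time)
def stepA (st : Int × List Int × Int) (log : List Int) : Int × List Int × Int :=
  let time := |st.1 - PySem.List.pyGetD log 1 0|
  if time > st.2.2 then (PySem.List.pyGetD log 1 0, [PySem.List.pyGetD log 0 0], time)
  else if time = st.2.2 then (PySem.List.pyGetD log 1 0, st.2.1 ++ [PySem.List.pyGetD log 0 0], st.2.2)
  else (PySem.List.pyGetD log 1 0, st.2.1, st.2.2)

-- `sorted(log_data)[0]` raises IndexError on empty log_data (logs = []); Pre_ excludes that, pyGetD's default is never used there.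
def hardestWorker (n : Int) (logs : List (List Int)) : Int :=
  let st := logs.foldl stepA (0, [], 0)
  PySem.List.pyGetD (PySem.List.sorted st.2.1 (fun x => x)) 0 0

-- ===== PORT B =====
-- loop body of B's pass, state = (prev, pairs)
def stepB (st : Int × List (Int × Int)) (log : List Int) : Int × List (Int × Int) :=
  (PySem.List.pyGetD log 1 0,
   st.2 ++ [(|st.1 - PySem.List.pyGetD log 1 0|, PySem.List.pyGetD log 0 0)])

-- `pairs[0][1]` raises IndexError on empty logs; Pre_ excludes that, pyGetD's default is never used there.
def hardestWorker_alt (n : Int) (logs : List (List Int)) : Int :=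
  let st := logs.foldl stepB (0, [])
  (PySem.List.pyGetD (PySem.List.sorted2 st.2 (fun p => -p.1) (fun p => p.2)) 0 (0, 0)).2

-- ===== PRECONDITION & SPEC =====
-- Python A raises IndexError when logs is empty (sorted([])[0]) or when some log has fewer than 2 entries (log[1]); Pre_ excludes exactly those.
def Pre_hardestWorker (n : Int) (logs : List (List Int)) : Prop :=
  logs ≠ [] ∧ ∀ l ∈ logs, 2 ≤ l.length
instance (n : Int) (logs : List (List Int)) : Decidable (Pre_hardestWorker n logs) := by unfold Pre_hardestWorker; infer_instance

def pvWitness_hardestWorker : Int × List (List Int) := (10, [[0, 3], [2, 5], [0, 9], [1, 15]])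

def Spec_hardestWorker (n : Int) (logs : List (List Int)) (out : Int) : Prop := out = hardestWorker_alt n logs
instance (n : Int) (logs : List (List Int)) (out : Int) : Decidable (Spec_hardestWorker n logs out) := by unfold Spec_hardestWorker; infer_instance

-- ===== CLAIM (what is proved, stated in full; the proofs are below) =====
def Claim_equal_hardestWorker : Prop := ∀ (n : Int) (logs : List (List Int)), Dom_hardestWorker n logs → Pre_hardestWorker n logs → Spec_hardestWorker n logs (hardestWorker n logs)

-- ===== LEMMAS AND PROOFS =====

-- proof-only abbreviations: the maximum duration of a pair table, and the ids holding it (in order)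
def maxDur (pairs : List (Int × Int)) : Int := pairs.foldl (fun m p => max m p.1) 0
def candOf (pairs : List (Int × Int)) (hi : Int) : List Int :=
  (pairs.filter (fun p => decide (p.1 = hi))).map (·.2)

-- the Bool "strictly before" relation PySem.List.sorted2 uses with keys (-p.1, p.2)
def ltb (a b : Int × Int) : Bool :=
  decide (-a.1 < -b.1) || (!decide (-b.1 < -a.1) && decide (a.2 < b.2))

lemma maxDur_append_singleton (pairs : List (Int × Int)) (q : Int × Int) :
    maxDur (pairs ++ [q]) = max (maxDur pairs) q.1 := by
  simp [maxDur, List.foldl_append]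

lemma foldl_max_le (xs : List Int) : ∀ (a b : Int), a ≤ b → (∀ y ∈ xs, y ≤ b) → xs.foldl max a ≤ b := by
  induction xs with
  | nil => intro a b h _; simpa using h
  | cons x t ih =>
      intro a b h hall
      simp only [List.foldl_cons]
      exact ih _ _ (max_le h (hall x (by simp))) (fun y hy => hall y (by simp [hy]))

lemma le_maxDur (pairs : List (Int × Int)) : ∀ p ∈ pairs, p.1 ≤ maxDur pairs := by
  intro p hp
  have h := (PySem.List.le_foldl_max (pairs.map (·.1)) 0).2 p.1 (List.mem_map_of_mem hp)
  simpa [maxDur, List.foldl_map] using h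

lemma candOf_append (pairs : List (Int × Int)) (q : Int × Int) (hi : Int) :
    candOf (pairs ++ [q]) hi = candOf pairs hi ++ (if q.1 = hi then [q.2] else []) := by
  simp only [candOf, List.filter_append, List.map_append]
  by_cases h : q.1 = hi <;> simp [h]

lemma candOf_eq_nil_of_lt (pairs : List (Int × Int)) (hi : Int)
    (h : ∀ p ∈ pairs, p.1 < hi) : candOf pairs hi = [] := by
  simp only [candOf, List.map_eq_nil_iff, List.filter_eq_nil_iff]
  intro p hp
  simpa using ne_of_lt (h p hp)

lemma step_inv (prev : Int) (pairs : List (Int × Int)) (log : List Int) :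
    stepA (prev, candOf pairs (maxDur pairs), maxDur pairs) log
      = ((stepB (prev, pairs) log).1,
         candOf (stepB (prev, pairs) log).2 (maxDur (stepB (prev, pairs) log).2),
         maxDur (stepB (prev, pairs) log).2) := by
  have hle := le_maxDur pairs
  simp only [stepA, stepB, maxDur_append_singleton, candOf_append]
  by_cases h1 : |prev - PySem.List.pyGetD log 1 0| > maxDur pairs
  · rw [if_pos h1]
    have hmax : max (maxDur pairs) |prev - PySem.List.pyGetD log 1 0|
        = |prev - PySem.List.pyGetD log 1 0| := max_eq_right (le_of_lt h1)
    rw [hmax, candOf_eq_nil_of_lt pairs _ (fun p hp => lt_of_le_of_lt (hle p hp) h1)]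
    simp
  · rw [if_neg h1]
    by_cases h2 : |prev - PySem.List.pyGetD log 1 0| = maxDur pairs
    · rw [if_pos h2]
      have hmax : max (maxDur pairs) |prev - PySem.List.pyGetD log 1 0| = maxDur pairs := by omega
      rw [hmax]
      simp [h2]
    · rw [if_neg h2]
      have hmax : max (maxDur pairs) |prev - PySem.List.pyGetD log 1 0| = maxDur pairs := by omega
      rw [hmax]
      simp [h2]

lemma fold_rel (logs : List (List Int)) : ∀ (prev : Int) (pairs : List (Int × Int)),
    logs.foldl stepA (prev, candOf pairs (maxDur pairs), maxDur pairs)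
      = ((logs.foldl stepB (prev, pairs)).1,
         candOf (logs.foldl stepB (prev, pairs)).2 (maxDur (logs.foldl stepB (prev, pairs)).2),
         maxDur (logs.foldl stepB (prev, pairs)).2) := by
  induction logs with
  | nil => intro prev pairs; rfl
  | cons l ls ih =>
      intro prev pairs
      simp only [List.foldl_cons, step_inv prev pairs l]
      exact ih (stepB (prev, pairs) l).1 (stepB (prev, pairs) l).2

lemma foldl_stepB_len (logs : List (List Int)) : ∀ (prev : Int) (pairs : List (Int × Int)),
    (logs.foldl stepB (prev, pairs)).2.length = pairs.length + logs.length := by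
  induction logs with
  | nil => intro prev pairs; rfl
  | cons l ls ih =>
      intro prev pairs
      simp only [List.foldl_cons]
      rw [ih]
      simp [stepB]
      omega

lemma foldl_stepB_nonneg (logs : List (List Int)) : ∀ (prev : Int) (pairs : List (Int × Int)),
    (∀ p ∈ pairs, 0 ≤ p.1) → ∀ p ∈ (logs.foldl stepB (prev, pairs)).2, 0 ≤ p.1 := by
  induction logs with
  | nil => intro prev pairs h; exact h
  | cons l ls ih =>
      intro prev pairs h
      simp only [List.foldl_cons]
      refine ih _ _ ?_
      intro p hp
      rcases (by simpa [stepB] using hp :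
          p ∈ pairs ∨ p = (|prev - PySem.List.pyGetD l 1 0|, PySem.List.pyGetD l 0 0)) with h1 | h1
      · exact h p h1
      · subst h1
        exact abs_nonneg _

lemma ltb_irrefl (a : Int × Int) : ltb a a = false := by simp [ltb]

lemma ltb_shift {x y b : Int × Int} (hxy : ltb x y = true) (hby : ltb b y = false) :
    ltb b x = false := by
  simp only [ltb, Bool.or_eq_true, Bool.and_eq_true, Bool.or_eq_false_iff, Bool.and_eq_false_iff,
    Bool.not_eq_true', decide_eq_true_iff, decide_eq_false_iff_not, Bool.not_eq_false'] at *
  omega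

lemma insertBy_min (x hh : Int × Int) (acc tt : List (Int × Int))
    (hinv : ∀ h0 t0, acc = h0 :: t0 → ∀ b ∈ acc, ltb b h0 = false)
    (he : PySem.List.insertBy ltb x acc = hh :: tt) :
    ∀ b ∈ hh :: tt, ltb b hh = false := by
  cases acc with
  | nil =>
      simp only [PySem.List.insertBy, List.cons.injEq] at he
      obtain ⟨rfl, rfl⟩ := he
      intro b hb
      simp only [List.mem_singleton] at hb
      subst hb
      exact ltb_irrefl _
  | cons y ys =>
      have hinv' : ∀ b ∈ y :: ys, ltb b y = false := hinv y ys rfl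
      by_cases hc : ltb x y = true
      · rw [show PySem.List.insertBy ltb x (y :: ys) = x :: y :: ys by
            simp [PySem.List.insertBy, hc]] at he
        obtain ⟨rfl, rfl⟩ := List.cons.injEq .. |>.mp he |>.imp id id
        intro b hb
        rcases List.mem_cons.1 hb with rfl | hb'
        · exact ltb_irrefl _
        · exact ltb_shift hc (hinv' b hb')
      · rw [show PySem.List.insertBy ltb x (y :: ys) = y :: PySem.List.insertBy ltb x ys by
            simp [PySem.List.insertBy, hc]] at he
        obtain ⟨rfl, rfl⟩ := List.cons.injEq .. |>.mp he |>.imp id id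
        intro b hb
        rcases List.mem_cons.1 hb with rfl | hb'
        · exact ltb_irrefl _
        · rcases (PySem.List.mem_insertBy ltb x b ys).1 hb' with rfl | hb''
          · exact Bool.not_eq_true _ |>.mp hc
          · exact hinv' b (List.mem_cons_of_mem _ hb'')

lemma foldl_insertBy_min (P : List (Int × Int)) : ∀ (acc : List (Int × Int)),
    (∀ h0 t0, acc = h0 :: t0 → ∀ b ∈ acc, ltb b h0 = false) →
    ∀ hh tt, P.foldl (fun acc x => PySem.List.insertBy ltb x acc) acc = hh :: tt →
      ∀ b ∈ hh :: tt, ltb b hh = false := by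
  induction P with
  | nil =>
      intro acc hinv hh tt he
      simp only [List.foldl_nil] at he
      exact he ▸ hinv hh tt he
  | cons x xs ih =>
      intro acc hinv hh tt he
      simp only [List.foldl_cons] at he
      refine ih (PySem.List.insertBy ltb x acc) ?_ hh tt he
      intro h0 t0 he0
      exact he0 ▸ insertBy_min x h0 acc t0 hinv he0

-- the head of sorted2 is lex-minimal for the keys (-p.1, p.2)
lemma head_sorted2_min (P : List (Int × Int)) {h : Int × Int} {t : List (Int × Int)}
    (he : PySem.List.sorted2 P (fun p => -p.1) (fun p => p.2) = h :: t) :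
    h ∈ P ∧ ∀ p ∈ P, ltb p h = false := by
  have hperm := PySem.List.sorted2_perm P (fun p => -p.1) (fun p => p.2) false
  have hu : PySem.List.sorted2 P (fun p => -p.1) (fun p => p.2)
      = P.foldl (fun acc x => PySem.List.insertBy ltb x acc) [] := rfl
  rw [hu] at he
  have hmin := foldl_insertBy_min P [] (by intro h0 t0 h'; cases h') h t he
  refine ⟨hperm.mem_iff.1 (by rw [hu, he]; exact List.mem_cons_self ..), ?_⟩
  intro p hp
  have hpm : p ∈ h :: t := by rw [← he, ← hu]; exact hperm.mem_iff.2 hp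
  exact hmin p hpm

lemma maxDur_eq (P : List (Int × Int)) : maxDur P = (P.map (·.1)).foldl max 0 := by
  simp [maxDur, List.foldl_map]

-- the uniqueness argument: both heads name the minimal id among the maximal-duration pairs
lemma final_eq (P : List (Int × Int)) (hne : P ≠ []) (h0 : ∀ p ∈ P, 0 ≤ p.1) :
    PySem.List.pyGetD (PySem.List.sorted (candOf P (maxDur P)) (fun x => x)) 0 0
      = (PySem.List.pyGetD (PySem.List.sorted2 P (fun p => -p.1) (fun p => p.2)) 0 (0, 0)).2 := by
  obtain ⟨h, t, he⟩ : ∃ h t, PySem.List.sorted2 P (fun p => -p.1) (fun p => p.2) = h :: t := by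
    cases hs : PySem.List.sorted2 P (fun p => -p.1) (fun p => p.2) with
    | nil =>
        exfalso
        have := (PySem.List.sorted2_perm P (fun p => -p.1) (fun p => p.2) false).symm.length_eq
        rw [hs] at this
        exact hne (List.eq_nil_of_length_eq_zero this)
    | cons h t => exact ⟨h, t, rfl⟩
  obtain ⟨hmem, hmin⟩ := head_sorted2_min P he
  -- h carries the maximal duration
  have hPle : ∀ p ∈ P, p.1 ≤ h.1 := by
    intro p hp
    have := hmin p hp
    simp only [ltb, Bool.or_eq_false_iff, Bool.and_eq_false_iff,
      decide_eq_false_iff_not, Bool.not_eq_false'] at this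
    omega
  have hM : h.1 = maxDur P := by
    have h1 : h.1 ≤ maxDur P := le_maxDur P h hmem
    have h2 : maxDur P ≤ h.1 := by
      rw [maxDur_eq]
      refine foldl_max_le _ 0 h.1 (h0 h hmem) ?_
      intro y hy
      obtain ⟨p, hp, rfl⟩ := List.mem_map.1 hy
      exact hPle p hp
    omega
  have hc : h.2 ∈ candOf P (maxDur P) :=
    List.mem_map_of_mem (List.mem_filter.2 ⟨hmem, by simp [hM]⟩)
  -- A's head
  obtain ⟨a, t', ha⟩ : ∃ a t', PySem.List.sorted (candOf P (maxDur P)) (fun x => x) = a :: t' := by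
    cases hs : PySem.List.sorted (candOf P (maxDur P)) (fun x => x) with
    | nil =>
        exfalso
        rw [PySem.List.sorted_eq_nil_iff] at hs
        rw [hs] at hc
        cases hc
    | cons a t' => exact ⟨a, t', rfl⟩
  rw [ha, he, PySem.List.pyGetD_zero_cons, PySem.List.pyGetD_zero_cons]
  have hamem : a ∈ candOf P (maxDur P) :=
    (PySem.List.sorted_perm (candOf P (maxDur P)) (fun x => x) false).mem_iff.1
      (by rw [ha]; exact List.mem_cons_self ..)
  have hale : a ≤ h.2 := PySem.List.key_head_sorted_le _ (fun x => x) ha h.2 hc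
  have hha : h.2 ≤ a := by
    obtain ⟨p, hpf, rfl⟩ := List.mem_map.1 hamem
    have hpP := List.mem_filter.1 hpf
    have hp1 : p.1 = maxDur P := by simpa using hpP.2
    have := hmin p hpP.1
    simp only [ltb, Bool.or_eq_false_iff, Bool.and_eq_false_iff,
      decide_eq_false_iff_not, Bool.not_eq_false', decide_eq_true_iff] at this
    omega
  omega

-- ===== VERDICT (by name: the statement is the Claim_ definition above) =====
theorem hardestWorker_spec : Claim_equal_hardestWorker := by
  intro n logs _ hpre
  show hardestWorker n logs = hardestWorker_alt n logs
  have h := fold_rel logs 0 []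
  have hcand : candOf ([] : List (Int × Int)) (maxDur []) = [] := rfl
  have hmax : maxDur ([] : List (Int × Int)) = 0 := rfl
  rw [hcand, hmax] at h
  simp only [hardestWorker, hardestWorker_alt, h]
  have hne : (logs.foldl stepB (0, [])).2 ≠ [] := by
    have := foldl_stepB_len logs 0 []
    intro hnil
    rw [hnil] at this
    simp at this
    exact hpre.1 (List.eq_nil_of_length_eq_zero this.symm)
  exact final_eq _ hne (foldl_stepB_nonneg logs 0 [] (by simp))
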